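-- pv_equiv track=rewrite | github.com/GINOXCVIII/SSL_TP_2019 | lexer.py | string_Automaton
-- ===== SOURCE A (Python) =====
-- TRAP_RESULT = "TRAP"
--
-- ACCEPT_RESULT = "ACCEPT"
--
-- NOACCEPT_RESULT = "NOT ACCEPT"
--
-- TRAP = -1
--
-- def string_Automaton (string):
-- 	final_state = 3
-- 	state = 0
-- 	for c in string:
-- 		if state == 0 and c == "'":
-- 			state = 1
-- 		elif state == 1 and (c.isdigit() or c.isalpha()):
-- 			state = 2
-- 		elif state == 2 and (c.isdigit() or c.isalpha()):
-- 			state = 2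
-- 		elif state == 2 and c == "'":
-- 			state = 3
-- 		else:
-- 			state = TRAP
-- 			break
--
-- 	if state == TRAP:
-- 		return TRAP_RESULT
-- 	if state == final_state:
-- 		return ACCEPT_RESULT
-- 	else:
-- 		if state != TRAP:
-- 			return NOACCEPT_RESULT
-- ===== SOURCE B (Python) =====
-- def string_Automaton(string):
--     # Structural classifier: a token is "'" + alnum+ + "'".
--     if string == "" or string == "'":
--         return "NOT ACCEPT"
--     if string[0] != "'":
--         return "TRAP"
--     body = string[1:]
--     if all(c.isdigit() or c.isalpha() for c in body):
--         return "NOT ACCEPT"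
--     if len(string) >= 3 and string[-1] == "'" and all(c.isdigit() or c.isalpha() for c in body[:-1]):
--         return "ACCEPT"
--     return "TRAP"
-- ===== Notes on version B (the rewrite author's own statement) =====
-- stated objective: simpler
-- what changed: Replaces A's per-character DFA loop (explicit state variable with break) by a direct structural classifier: check the empty/lone-quote cases, then decide ACCEPT / NOT ACCEPT / TRAP from the first character, last character and an all-alphanumeric test on the interior.
import Mathlib
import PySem

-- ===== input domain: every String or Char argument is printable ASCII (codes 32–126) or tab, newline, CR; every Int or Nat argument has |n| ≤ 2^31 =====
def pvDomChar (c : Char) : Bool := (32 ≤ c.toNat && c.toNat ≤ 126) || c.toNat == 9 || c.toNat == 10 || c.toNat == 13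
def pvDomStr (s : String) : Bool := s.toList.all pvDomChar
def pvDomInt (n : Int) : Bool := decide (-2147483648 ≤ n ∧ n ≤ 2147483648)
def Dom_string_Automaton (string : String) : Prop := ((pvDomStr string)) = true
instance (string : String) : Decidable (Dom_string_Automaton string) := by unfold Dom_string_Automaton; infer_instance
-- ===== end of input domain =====

-- B replaces A's character-by-character state-machine loop by a structural shape classifier; objective: simpler.


-- ===== PORT A =====
-- A's for-loop with break: recursion over the chars; state -1 (TRAP) ends the loop
def pvALoop (state : Int) (cs : List Char) : Int :=
  match cs with
  | [] => state
  | c :: rest =>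
    if state == 0 && c == '\'' then pvALoop 1 rest
    else if state == 1 && (PySem.Chars.isdigit c || PySem.Chars.isalpha c) then pvALoop 2 rest
    else if state == 2 && (PySem.Chars.isdigit c || PySem.Chars.isalpha c) then pvALoop 2 rest
    else if state == 2 && c == '\'' then pvALoop 3 rest
    else (-1)
def pvAlnum (c : Char) : Bool := PySem.Chars.isdigit c || PySem.Chars.isalpha c


def string_Automaton (string : String) : String :=
  let final_state : Int := 3
  let state := pvALoop 0 string.toList
  if state == -1 then "TRAP"
  else if state == final_state then "ACCEPT"
  else "NOT ACCEPT"

-- ===== PORT B =====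
def string_Automaton_alt (string : String) : String :=
  let cs := string.toList
  if cs == [] || cs == ['\''] then "NOT ACCEPT"           -- string in ("", "'")
  else if PySem.List.pyGet? cs 0 != some '\'' then "TRAP" -- string[0] != "'"
  else
    let body := PySem.List.slice cs (some 1) none           -- string[1:]
    if body.all pvAlnum then "NOT ACCEPT"
    else if decide (3 ≤ cs.length) && (PySem.List.pyGet? cs (-1) == some '\'')
            && (PySem.List.slice body none (some (-1))).all pvAlnum then "ACCEPT"
    else "TRAP"

-- ===== PRECONDITION & SPEC =====
def Spec_string_Automaton (string : String) (out : String) : Prop := out = string_Automaton_alt string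
instance (string : String) (out : String) : Decidable (Spec_string_Automaton string out) := by unfold Spec_string_Automaton; infer_instance

-- ===== CLAIM (what is proved, stated in full; the proofs are below) =====
def Claim_equal_string_Automaton : Prop := ∀ (string : String), Dom_string_Automaton string → Spec_string_Automaton string (string_Automaton string)

-- ===== LEMMAS AND PROOFS =====
theorem pvALoop_two (cs : List Char) :
    pvALoop 2 cs =
      if cs.all pvAlnum then 2
      else if cs.getLast? = some '\'' ∧ cs.dropLast.all pvAlnum then 3
      else -1 := by
  induction cs with
  | nil => rfl
  | cons c rest ih =>
    by_cases hc : pvAlnum c = true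
    · have hcq : c ≠ '\'' := fun e => by rw [e] at hc; exact absurd hc (by decide)
      have step : pvALoop 2 (c :: rest) = pvALoop 2 rest := by
        have hc2 := hc; simp only [pvAlnum] at hc2
        simp [pvALoop, hc2]
      rw [step, ih]
      cases rest with
      | nil => simp [hc]
      | cons d rs =>
        by_cases hall : (d :: rs).all pvAlnum = true
        · simp [hall, hc]
        · simp only [Bool.not_eq_true] at hall
          simp [hall, hc]
    · have hc' : pvAlnum c = false := by simpa using hc
      by_cases hq : c = '\''
      · subst hq
        have step : pvALoop 2 ('\'' :: rest) = pvALoop 3 rest := by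
          simp [pvALoop]; simp [pvAlnum] at hc'; simp [hc']
        rw [step]
        have h3 : pvALoop 3 rest = if rest = [] then 3 else -1 := by
          cases rest with
          | nil => rfl
          | cons d rs => simp [pvALoop]
        rw [h3]
        cases rest with
        | nil => simp [hc']
        | cons d rs => simp [hc']
      · have step : pvALoop 2 (c :: rest) = -1 := by
          simp [pvALoop, hq]; simp [pvAlnum] at hc'; simp [hc']
        rw [step]
        cases rest with
        | nil => simp [hc', hq]
        | cons d rs => simp [hc']

theorem main_list (cs : List Char) :
    (let state := pvALoop 0 cs
     if state == (-1 : Int) then "TRAP" else if state == 3 then "ACCEPT" else "NOT ACCEPT")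
    =
    (if cs == [] || cs == ['\''] then "NOT ACCEPT"
     else if PySem.List.pyGet? cs 0 != some '\'' then "TRAP"
     else
       let body := PySem.List.slice cs (some 1) none
       if body.all pvAlnum then "NOT ACCEPT"
       else if decide (3 ≤ cs.length) && (PySem.List.pyGet? cs (-1) == some '\'')
               && (PySem.List.slice body none (some (-1))).all pvAlnum then "ACCEPT"
       else "TRAP") := by
  cases cs with
  | nil => rfl
  | cons c rest =>
    by_cases hq : c = '\''
    · subst hq
      cases rest with
      | nil => rfl
      | cons d rs =>
        have step0 : pvALoop 0 ('\'' :: d :: rs) = pvALoop 1 (d :: rs) := by simp [pvALoop]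
        have hslice1 : PySem.List.slice ('\'' :: d :: rs) (some 1) none = d :: rs := by
          simpa using PySem.List.slice_from_natCast ('\'' :: d :: rs) 1
        have hget0 : PySem.List.pyGet? ('\'' :: d :: rs) 0 = some '\'' :=
          PySem.List.pyGet?_zero_cons _ _
        have hdl : PySem.List.slice (d :: rs) none (some (-1)) = (d :: rs).dropLast :=
          PySem.List.slice_to_neg_one (d :: rs)
        have hlast : PySem.List.pyGet? ('\'' :: d :: rs) (-1) = ('\'' :: d :: rs).getLast? :=
          PySem.List.pyGet?_neg_one _
        by_cases hd : pvAlnum d = true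
        · have hd2 := hd; simp only [pvAlnum] at hd2
          have hdq : d ≠ '\'' := fun e => by rw [e] at hd; exact absurd hd (by decide)
          have step1 : pvALoop 1 (d :: rs) = pvALoop 2 rs := by
            simp [pvALoop, hd2]
          by_cases hall : rs.all pvAlnum = true
          · have h2 : pvALoop 2 rs = 2 := by rw [pvALoop_two, if_pos hall]
            simp [step0, step1, h2, hget0, hslice1, hd, hall]
          · have hallf : rs.all pvAlnum = false := by simpa using hall
            have hrs : rs ≠ [] := by rintro rfl; simp at hallf
            by_cases hacc : rs.getLast? = some '\'' ∧ rs.dropLast.all pvAlnum = true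
            · have h2 : pvALoop 2 rs = 3 := by
                rw [pvALoop_two, if_neg (by simp [hallf]), if_pos hacc]
              have hlast2 : ('\'' :: d :: rs).getLast? = some '\'' := by
                cases rs with | nil => exact absurd rfl hrs | cons a b => simpa using hacc.1
              have hdrop : ((d :: rs).dropLast.all pvAlnum) = true := by
                cases rs with
                | nil => exact absurd rfl hrs
                | cons a b =>
                  rw [List.dropLast_cons₂, List.all_cons, hd, Bool.true_and]
                  simpa using hacc.2
              simp [step0, step1, h2, hget0, hslice1, hallf, hd, hlast, hlast2, hdl, hdrop, hrs]
            · have h2 : pvALoop 2 rs = -1 := by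
                rw [pvALoop_two, if_neg (by simp [hallf]), if_neg hacc]
              cases rs with
              | nil => exact absurd rfl hrs
              | cons a b =>
                by_cases hL : (a :: b).getLast? = some '\''
                · have hC : (a :: b).dropLast.all pvAlnum = false := by
                    cases h : (a :: b).dropLast.all pvAlnum
                    · rfl
                    · exact absurd ⟨hL, h⟩ hacc
                  have hdropf : ((d :: a :: b).dropLast.all pvAlnum) = false := by
                    rw [List.dropLast_cons₂, List.all_cons, hC, Bool.and_false]
                  simp [step0, step1, h2, hget0, hslice1, hallf, hd, hdl]
                  intro _
                  simpa [List.all_eq_false] using hC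
                · have hlastf : ('\'' :: d :: a :: b).getLast? ≠ some '\'' := by
                    simpa using hL
                  simp [step0, step1, h2, hget0, hslice1, hallf, hd, hlast]
                  intro h
                  exact absurd h hL
        · have hd' : pvAlnum d = false := by simpa using hd
          have hd2 := hd'; simp only [pvAlnum] at hd2
          have step1 : pvALoop 1 (d :: rs) = -1 := by
            simp [pvALoop, hd2]
          have hbody : ((d :: rs).all pvAlnum) = false := by simp [hd']
          cases rs with
          | nil => simp [step0, step1, hslice1, hbody]
          | cons a b =>
            simp [step0, step1, hslice1, hbody, hdl]
            intro _ h
            exact absurd h hd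
    · have step0 : pvALoop 0 (c :: rest) = -1 := by
        simp [pvALoop, hq]
      simp [step0, hq]

-- ===== VERDICT (by name: the statement is the Claim_ definition above) =====
theorem string_Automaton_spec : Claim_equal_string_Automaton := by
  intro s _
  show string_Automaton s = string_Automaton_alt s
  unfold string_Automaton string_Automaton_alt
  exact main_list s.toList
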